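-- pv_equiv track=rewrite | github.com/Dariusan3/faculty | first-year/sem-1/lsd/main.py | mult_comune
-- ===== SOURCE A (Python) =====
-- def mult_comune(dictionar, lista):
--     if len(lista) > 1:
--         head = lista[0]
--         tail = lista[1:]
--         if head in dictionar.keys():
--             return {dictionar[head]} | mult_comune(dictionar, tail)
--         else:
--             return mult_comune(dictionar, tail)
--     else:
--         return set()
-- ===== SOURCE B (Python) =====
-- def mult_comune(dictionar, lista):
--     rezultat = set()
--     for x in lista[:-1]:
--         if x in dictionar:
--             rezultat.add(dictionar[x])
--     return rezultat
-- ===== Notes on version B (the rewrite author's own statement) =====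
-- stated objective: faster
-- what changed: Replaced the linear recursion that builds the result by repeated singleton-set unions (copying the accumulated set at every step) with a single iterative pass over lista[:-1] adding into one mutable set.
import Mathlib
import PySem

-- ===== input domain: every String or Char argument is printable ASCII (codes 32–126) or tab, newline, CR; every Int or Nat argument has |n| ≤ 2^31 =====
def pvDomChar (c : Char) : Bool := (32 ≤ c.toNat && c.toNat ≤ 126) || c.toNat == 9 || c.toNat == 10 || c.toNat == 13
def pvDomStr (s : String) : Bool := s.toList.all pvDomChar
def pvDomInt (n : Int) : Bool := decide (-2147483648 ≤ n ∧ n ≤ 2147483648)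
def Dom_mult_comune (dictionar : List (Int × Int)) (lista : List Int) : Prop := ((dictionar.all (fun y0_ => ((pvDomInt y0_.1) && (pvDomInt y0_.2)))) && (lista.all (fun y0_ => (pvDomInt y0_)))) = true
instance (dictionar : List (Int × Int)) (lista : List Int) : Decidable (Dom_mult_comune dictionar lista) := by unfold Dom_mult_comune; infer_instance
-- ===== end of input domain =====

-- B replaces A's singleton-union recursion (which copies the accumulated set at every step) by one iterative pass over lista[:-1] into a mutable set (objective: faster, measured).

-- ===== PORT A =====
-- 'len(lista) > 1' is decomposed structurally: lista = head :: tail with tail nonempty.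
-- dictionar[head] is guarded by 'head in dictionar.keys()', so the getD default is never the result of a missing key.
def mult_comune (dictionar : List (Int × Int)) (lista : List Int) : List Int :=
  match lista with
  | head :: tail =>
    if 1 ≤ tail.length then
      if (PySem.Dict.mk dictionar).contains head then
        PySem.Set.union [((PySem.Dict.mk dictionar).get? head).getD 0] (mult_comune dictionar tail)
      else
        mult_comune dictionar tail
    else []
  | [] => []

-- ===== PORT B =====
def mult_comune_alt (dictionar : List (Int × Int)) (lista : List Int) : List Int :=
  (PySem.List.slice lista none (some (-1))).foldl
    (fun rezultat x =>
      if (PySem.Dict.mk dictionar).contains x then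
        PySem.Set.add rezultat (((PySem.Dict.mk dictionar).get? x).getD 0)
      else rezultat)
    PySem.Set.empty

-- ===== PRECONDITION & SPEC =====
def Spec_mult_comune (dictionar : List (Int × Int)) (lista : List Int) (out : List Int) : Prop := out = mult_comune_alt dictionar lista
instance (dictionar : List (Int × Int)) (lista : List Int) (out : List Int) : Decidable (Spec_mult_comune dictionar lista out) := by unfold Spec_mult_comune; infer_instance

-- ===== CLAIM (what is proved, stated in full; the proofs are below) =====
def Claim_equal_mult_comune : Prop := ∀ (dictionar : List (Int × Int)) (lista : List Int), Dom_mult_comune dictionar lista → Spec_mult_comune dictionar lista (mult_comune dictionar lista)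

-- ===== LEMMAS AND PROOFS =====

-- lista[:-1] is dropLast
lemma slice_neg_one (l : List Int) : PySem.List.slice l none (some (-1)) = l.dropLast := by
  simp [PySem.List.slice, List.dropLast_eq_take]

-- the dict-values of the hits of m, in order (filterMap form)
def pvVals (dictionar : List (Int × Int)) (m : List Int) : List Int :=
  m.filterMap (fun x =>
    if (PySem.Dict.mk dictionar).contains x then
      some (((PySem.Dict.mk dictionar).get? x).getD 0)
    else none)

lemma foldl_eq_update (dictionar : List (Int × Int)) (m : List Int) (s : List Int) :
    m.foldl (fun rezultat x =>
      if (PySem.Dict.mk dictionar).contains x then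
        PySem.Set.add rezultat (((PySem.Dict.mk dictionar).get? x).getD 0)
      else rezultat) s = PySem.Set.update s (pvVals dictionar m) := by
  induction m generalizing s with
  | nil => simp [pvVals, PySem.Set.update]
  | cons x m ih =>
    by_cases h : (PySem.Dict.mk dictionar).contains x
    · simp only [pvVals, List.filterMap_cons, h, if_true, List.foldl_cons, ih,
        PySem.Set.update_cons]
    · simp only [pvVals, List.filterMap_cons, h, List.foldl_cons, ih]
      simp

lemma union_single (v : Int) (V : List Int) :
    PySem.Set.union [v] (PySem.Set.ofList V) = PySem.Set.ofList (v :: V) := by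
  rw [PySem.Set.ofList_cons]
  rw [show PySem.Set.union [v] (PySem.Set.ofList V) = PySem.Set.update [v] (PySem.Set.ofList V) from rfl]
  rw [PySem.Set.update_eq_append_filter, PySem.Set.ofList_ofList]
  simp [PySem.Set.discard, PySem.Set.contains]
  apply List.filter_congr
  intro y _
  by_cases h : y = v <;> simp [h]

lemma alt_eq (dictionar : List (Int × Int)) (lista : List Int) :
    mult_comune_alt dictionar lista = PySem.Set.ofList (pvVals dictionar lista.dropLast) := by
  rw [mult_comune_alt, slice_neg_one, foldl_eq_update]
  exact PySem.Set.update_nil_left _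

lemma step (dictionar : List (Int × Int)) (h y : Int) (t' : List Int) :
    mult_comune dictionar (h :: y :: t') =
      if (PySem.Dict.mk dictionar).contains h then
        PySem.Set.union [((PySem.Dict.mk dictionar).get? h).getD 0] (mult_comune dictionar (y :: t'))
      else mult_comune dictionar (y :: t') := by
  conv_lhs => rw [mult_comune]
  simp

lemma a_eq (dictionar : List (Int × Int)) (lista : List Int) :
    mult_comune dictionar lista = PySem.Set.ofList (pvVals dictionar lista.dropLast) := by
  induction lista with
  | nil => simp [mult_comune, pvVals]
  | cons h t ih =>
    match t with
    | [] => simp [mult_comune, pvVals]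
    | y :: t' =>
      rw [show (h :: y :: t').dropLast = h :: (y :: t').dropLast from rfl, step]
      by_cases hc : (PySem.Dict.mk dictionar).contains h
      · have hc' : (dictionar.any fun p => p.1 == h) = true := hc
        rw [if_pos hc, ih, union_single]
        simp [pvVals, hc']
      · have hc' : ¬ (dictionar.any fun p => p.1 == h) = true := hc
        rw [if_neg hc, ih]
        simp [pvVals, hc']

-- ===== VERDICT (by name: the statement is the Claim_ definition above) =====
theorem mult_comune_spec : Claim_equal_mult_comune := by
  intro d l _
  unfold Spec_mult_comune
  rw [a_eq, alt_eq]
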